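-- pv_equiv track=rewrite | github.com/pypi-data/pypi-mirror-79 | packages/pyappnvn/pyappnvn-0.0.3.tar.gz/pyappnvn-0.0.3/pynvn/string/list.py | addvaluexk
-- ===== SOURCE A (Python) =====
-- def addvaluexk(listf = [],valuetoadd=" "):
--     """ add value xen ke """
--     liststr = []
--     lenc = len(listf)
--     for count,ele in enumerate(listf,1):
--         if count != lenc:
--             liststr.append(ele)
--             liststr.append(valuetoadd)
--         else:
--             liststr.append(ele)
--     return liststr
-- ===== SOURCE B (Python) =====
-- def addvaluexk(listf=[], valuetoadd=" "):
--     """ add value xen ke """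
--     n = len(listf)
--     out = [valuetoadd] * (2 * n - 1)
--     out[0::2] = listf
--     return out
-- ===== Notes on version B (the rewrite author's own statement) =====
-- stated objective: idiomatic
-- what changed: Replaces the enumerate loop with its per-iteration last-element branch by preallocating [valuetoadd]*(2n-1) and scattering the original elements into the even positions with strided slice assignment.
import Mathlib
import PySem

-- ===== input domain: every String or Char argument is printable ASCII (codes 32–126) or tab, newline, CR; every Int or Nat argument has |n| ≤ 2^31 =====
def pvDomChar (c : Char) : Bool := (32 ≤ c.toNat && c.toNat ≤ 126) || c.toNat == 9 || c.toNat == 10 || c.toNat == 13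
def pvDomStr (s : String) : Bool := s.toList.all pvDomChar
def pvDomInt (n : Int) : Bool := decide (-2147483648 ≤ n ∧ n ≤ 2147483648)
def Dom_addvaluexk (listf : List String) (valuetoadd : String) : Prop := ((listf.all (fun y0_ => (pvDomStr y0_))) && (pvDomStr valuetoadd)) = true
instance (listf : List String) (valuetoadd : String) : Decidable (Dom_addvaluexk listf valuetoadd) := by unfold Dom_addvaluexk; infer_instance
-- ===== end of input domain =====

-- ===== PORT A =====
-- B preallocates the full result and scatters listf into the even indices (slice-assignment style); A appends in a loop. Return values proved equal; neither mutates.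
def addvaluexk (listf : List String) (valuetoadd : String) : List String :=
  let lenc : Int := listf.length
  List.foldl
    (fun liststr (p : Int × String) =>
      if p.1 ≠ lenc then liststr ++ [p.2] ++ [valuetoadd]
      else liststr ++ [p.2])
    [] (PySem.List.enumerate listf 1)

-- ===== PORT B =====
-- out = [valuetoadd] * (2n-1); out[0::2] = listf  — realised as: position i holds listf[i/2] when i is even, valuetoadd when i is odd
def addvaluexk_alt (listf : List String) (valuetoadd : String) : List String :=
  (List.range (2 * listf.length - 1)).map
    (fun i => if i % 2 == 0 then listf.getD (i / 2) "" else valuetoadd)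

-- ===== PRECONDITION & SPEC =====
def Spec_addvaluexk (listf : List String) (valuetoadd : String) (out : List String) : Prop := out = addvaluexk_alt listf valuetoadd
instance (listf : List String) (valuetoadd : String) (out : List String) : Decidable (Spec_addvaluexk listf valuetoadd out) := by unfold Spec_addvaluexk; infer_instance

-- ===== CLAIM (what is proved, stated in full; the proofs are below) =====
def Claim_equal_addvaluexk : Prop := ∀ (listf : List String) (valuetoadd : String), Dom_addvaluexk listf valuetoadd → Spec_addvaluexk listf valuetoadd (addvaluexk listf valuetoadd)

-- ===== LEMMAS AND PROOFS =====

-- ===== VERDICT (by name: the statement is the Claim_ definition above) =====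
-- canonical interspersed form, used only by the proofs
def interS (v : String) : List String → List String
  | [] => []
  | [x] => [x]
  | x :: y :: rest => x :: v :: interS v (y :: rest)

lemma foldA (v : String) (n : Int) :
    ∀ (l : List String) (k : Int) (acc : List String), k + (l.length : Int) = n →
      List.foldl
        (fun liststr (p : Int × String) =>
          if p.1 ≠ n then liststr ++ [p.2] ++ [v] else liststr ++ [p.2])
        acc (PySem.List.enumerate l (k + 1)) = acc ++ interS v l := by
  intro l
  induction l with
  | nil => intro k acc h; simp [PySem.List.enumerate_nil, interS]
  | cons x rest ih =>
    intro k acc h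
    cases rest with
    | nil =>
      simp at h
      simp [PySem.List.enumerate_cons, PySem.List.enumerate_nil, interS, h]
    | cons y rest' =>
      have hne : k + 1 ≠ n := by
        simp only [List.length_cons] at h; push_cast at h; omega
      rw [PySem.List.enumerate_cons, List.foldl_cons]
      rw [if_pos hne]
      rw [ih (k + 1) _ (by simp only [List.length_cons] at h ⊢; push_cast at h ⊢; omega)]
      simp [interS]

lemma interS_append (v : String) :
    ∀ (l : List String) (x : String), l ≠ [] →
      interS v (l ++ [x]) = interS v l ++ [v, x] := by
  intro l
  induction l with
  | nil => intro x h; exact absurd rfl h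
  | cons a rest ih =>
    intro x _
    cases rest with
    | nil => simp [interS]
    | cons b rest' =>
      have := ih x (by simp)
      simp only [List.cons_append, interS] at this ⊢
      rw [this]

lemma mapB (v : String) :
    ∀ (l : List String),
      (List.range (2 * l.length - 1)).map
        (fun i => if i % 2 == 0 then l.getD (i / 2) "" else v) = interS v l := by
  intro l
  induction l using List.reverseRecOn with
  | nil => simp [interS]
  | append_singleton l' x ih =>
    cases l' with
    | nil => simp [List.range_succ, interS]
    | cons a t =>
      have hlen : 2 * ((a :: t) ++ [x]).length - 1 = (2 * (a :: t).length - 1) + 1 + 1 := by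
        simp; omega
      rw [hlen, List.range_succ, List.range_succ, List.map_append, List.map_append]
      have hmain :
          (List.range (2 * (a :: t).length - 1)).map
            (fun i => if i % 2 == 0 then ((a :: t) ++ [x]).getD (i / 2) "" else v)
          = interS v (a :: t) := by
        rw [← ih]
        apply List.map_congr_left
        intro i hi
        have hi' := List.mem_range.mp hi
        by_cases he : i % 2 == 0
        · have hlt : i / 2 < (a :: t).length := by
            simp at hi' ⊢; omega
          simp only [he, if_true, List.getD]
          rw [List.getElem?_append_left hlt]
        · simp [he]
      rw [hmain]
      have hodd : ((2 * (a :: t).length - 1) % 2 == 0) = false := by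
        simp only [List.length_cons, beq_eq_false_iff_ne, ne_eq]; omega
      have heven : ((2 * (a :: t).length - 1 + 1) % 2 == 0) = true := by
        simp only [List.length_cons, beq_iff_eq]; omega
      have hdiv : (2 * (a :: t).length - 1 + 1) / 2 = (a :: t).length := by
        simp only [List.length_cons]; omega
      rw [interS_append v (a :: t) x (by simp)]
      simp only [List.map_cons, List.map_nil, hodd, heven, hdiv, Bool.false_eq_true,
        if_false, if_true]
      simp [List.getD]

-- ===== VERDICT (by name: the statement is the Claim_ definition above) =====
theorem addvaluexk_spec : Claim_equal_addvaluexk := by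
  intro listf valuetoadd _
  unfold Spec_addvaluexk addvaluexk addvaluexk_alt
  rw [mapB]
  have h := foldA valuetoadd (listf.length : Int) listf 0 [] (by simp)
  simpa using h
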